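-- pv_equiv track=rewrite | github.com/karolisr/kakapo | kakapo/orf.py | get_orf_coords_for_forward_frame
-- ===== SOURCE A (Python) =====
-- from functools import partial, reduce
-- from itertools import accumulate, chain, compress, dropwhile, groupby, starmap
-- from operator import add, contains, itemgetter, mul, ne, not_, sub
--
-- def get_codons(seq):
--     """Split seq into codons."""
--     reduce_add = partial(reduce, add)
--     return tuple(map(reduce_add, zip(*[iter(seq)] * 3)))
--
-- def separate_stop_codons(codons, stop_codons):
--     test = partial(contains, stop_codons)
--     return tuple(tuple(v) for k, v in groupby(codons, test))
--
-- def keep_orf_codons(sep_codons, start_codons):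
--     test = partial(lambda *x: not_(contains(*x)), start_codons)
--     return tuple(map(lambda x: tuple(dropwhile(test, x)), sep_codons))
--
-- def get_orf_coords(seq, start_codons, stop_codons):
--     sep_codons = separate_stop_codons(get_codons(seq), stop_codons)
--
--     orf_len = tuple(map(len, keep_orf_codons(sep_codons, start_codons)))
--     orf_idx = tuple(map(partial(ne, 0), orf_len))
--
--     orf_end = tuple(compress(accumulate(map(len, sep_codons)), orf_idx))
--     orf_beg = starmap(sub, zip(orf_end, compress(orf_len, orf_idx)))
--
--     return tuple(zip(map(partial(mul, 3), orf_beg),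
--                      map(partial(mul, 3), orf_end)))
--
-- def get_orf_coords_for_forward_frame(seq, start_codons, stop_codons,
--                                      min_len=100, frame=1):
--     assert type(frame) is int
--     assert frame >= 1
--     if len(seq) < min_len:
--         return tuple()
--     offset = frame - 1
--     orf_coords = get_orf_coords(seq[offset:], start_codons, stop_codons)
--     adjust = partial(add, offset)
--     coords = tuple(map(lambda x: tuple(map(adjust, x)), orf_coords))
--     coords_filtered = tuple(filter(lambda x: x[1] - x[0] >= min_len, coords))
--     if len(coords_filtered) > 0:
--         used_start_codons = tuple(map(lambda x: x[0] // 3, coords))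
--         seq = seq[:offset % 3] + reduce(add, ['...' if i in used_start_codons else x
--                                               for i, x in enumerate(get_codons(seq[offset % 3:]))])
--         new_start = min(tuple(chain.from_iterable(coords_filtered))) + 4
--         coords_filtered += get_orf_coords_for_forward_frame(
--             seq, start_codons, stop_codons, min_len, frame=new_start)
--     return coords_filtered
-- ===== SOURCE B (Python) =====
-- def _codons(s):
--     out = []
--     for k in range(0, len(s) - 2, 3):
--         out.append(s[k:k + 3])
--     return out
--
--
-- def _orf_coords(codons, start_codons, stop_codons):
--     # label every codon with a run id (prefix count of stop-key changes),
--     # then bucket per id: run_end[id] = last index + 1, first_start[id] = first start index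
--     rid = []
--     r = -1
--     prev = None
--     for c in codons:
--         k = c in stop_codons
--         if k != prev:
--             r += 1
--             prev = k
--         rid.append(r)
--     run_end = {}
--     first_start = {}
--     for i, c in enumerate(codons):
--         run_end[rid[i]] = i + 1
--         if c in start_codons and rid[i] not in first_start:
--             first_start[rid[i]] = i
--     return [(3 * first_start[q], 3 * run_end[q])
--             for q in range(r + 1) if q in first_start]
--
--
-- def get_orf_coords_for_forward_frame(seq, start_codons, stop_codons,
--                                      min_len=100, frame=1):
--     assert type(frame) is int
--     assert frame >= 1
--     results = []
--     while len(seq) >= min_len: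
--         offset = frame - 1
--         coords = [(b + offset, e + offset)
--                   for b, e in _orf_coords(_codons(seq[offset:]),
--                                           start_codons, stop_codons)]
--         filtered = [c for c in coords if c[1] - c[0] >= min_len]
--         results.extend(filtered)
--         if not filtered:
--             break
--         used = {b // 3 for b, _ in coords}
--         pre = offset % 3
--         seq = seq[:pre] + ''.join(
--             '...' if i in used else c for i, c in enumerate(_codons(seq[pre:])))
--         frame = min(b for b, _ in filtered) + 4
--     return tuple(results)
-- ===== Notes on version B (the rewrite author's own statement) =====
-- stated objective: alternative
-- what changed: A's groupby/dropwhile + accumulate/compress/starmap run pipeline is replaced by run-id labelling: one pass assigns each codon a run id (prefix count of stop-key changes), a second pass buckets per id into dicts (last index+1 and first start index), and the coordinates are emitted per id; the recursive outer function is replaced by an iterative while loop with an accumulator.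
import Mathlib
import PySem

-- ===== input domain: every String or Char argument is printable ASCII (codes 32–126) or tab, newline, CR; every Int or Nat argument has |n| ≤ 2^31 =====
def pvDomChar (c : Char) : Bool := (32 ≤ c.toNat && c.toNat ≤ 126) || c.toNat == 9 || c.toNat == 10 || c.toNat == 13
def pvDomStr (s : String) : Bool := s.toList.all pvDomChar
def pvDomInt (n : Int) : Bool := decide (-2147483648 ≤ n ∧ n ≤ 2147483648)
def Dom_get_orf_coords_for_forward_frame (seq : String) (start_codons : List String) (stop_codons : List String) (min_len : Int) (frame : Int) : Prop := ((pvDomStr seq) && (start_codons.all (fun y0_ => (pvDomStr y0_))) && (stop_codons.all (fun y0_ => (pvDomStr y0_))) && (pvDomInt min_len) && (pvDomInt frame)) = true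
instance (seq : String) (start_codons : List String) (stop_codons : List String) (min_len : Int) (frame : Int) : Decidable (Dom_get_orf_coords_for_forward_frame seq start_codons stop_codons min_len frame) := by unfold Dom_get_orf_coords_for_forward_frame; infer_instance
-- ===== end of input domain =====

-- B replaces A's itertools pipeline (groupby/dropwhile + accumulate/compress/starmap tuple
-- streams) by run-id labelling: one pass tags each codon with a run id (prefix count of
-- stop-key changes), dict passes bucket last-index+1 and first-start per id, and the outer
-- recursion becomes an iterative accumulator loop (objective: alternative, not faster).


-- ===== PORT A =====
-- get_codons: zip(*[iter(seq)]*3) chunks of exactly 3, remainder dropped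
def aGetCodons : List Char → List String
  | a :: b :: c :: rest => String.mk [a, b, c] :: aGetCodons rest
  | _ => []

-- itertools.groupby keyed by `codon in stop_codons` (separate_stop_codons)
def aGroupby (p : String → Bool) : List String → List (List String)
  | [] => []
  | c :: rest =>
    (c :: rest.takeWhile (fun x => p x == p c)) ::
      aGroupby p (rest.dropWhile (fun x => p x == p c))
  termination_by l => l.length
  decreasing_by
    have := List.length_dropWhile_le (fun x => p x == p c) rest
    simp; omega

-- itertools.accumulate of the group lengths (running sums)
def aAccumulate : List Nat → Nat → List Nat
  | [], _ => []
  | x :: xs, acc => (acc + x) :: aAccumulate xs (acc + x)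

-- itertools.compress
def aCompress : List Nat → List Bool → List Nat
  | x :: xs, b :: bs => if b then x :: aCompress xs bs else aCompress xs bs
  | _, _ => []

-- get_orf_coords: the full pipeline
def aOrfCoords (startc stopc : List String) (seqc : List Char) : List (Int × Int) :=
  let sep := aGroupby (fun c => stopc.contains c) (aGetCodons seqc)
  let kept := sep.map (fun g => g.dropWhile (fun x => !(startc.contains x)))
  let orf_len := kept.map List.length
  let orf_idx := orf_len.map (fun n => n != 0)
  let orf_end := aCompress (aAccumulate (sep.map List.length) 0) orf_idx
  let orf_beg := (orf_end.zip (aCompress orf_len orf_idx)).map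
      (fun p => (p.1 : Int) - (p.2 : Int))
  (orf_beg.map (fun b => 3 * b)).zip (orf_end.map (fun e => 3 * (e : Int)))

-- the recursive outer function; fuel only makes the recursion total: depth is bounded by
-- len/3+2 because frame grows by ≥ 3 per recursive call, so fuel = len+2 never runs out
def aRec (startc stopc : List String) (min_len : Int) : Nat → List Char → Int → List (Int × Int)
  | 0, _, _ => []
  | fuel + 1, seqc, frame =>
    if frame < 1 then [] else       -- Python: assert frame >= 1 (excluded by Pre_)
    if (seqc.length : Int) < min_len then [] else
    let offset := (frame - 1).toNat
    let coords := (aOrfCoords startc stopc (seqc.drop offset)).map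
        (fun p => (p.1 + (offset : Int), p.2 + (offset : Int)))
    let filtered := coords.filter (fun p => decide (min_len ≤ p.2 - p.1))
    if filtered.length = 0 then filtered else
      let used := coords.map (fun p => PySem.Int.floordiv p.1 3)
      let pre := offset % 3
      let newSeq := ((PySem.List.enumerate (aGetCodons (seqc.drop pre)) 0).map
          (fun q => if used.contains q.1 then "..." else q.2)).foldl
          (fun a s => a ++ s.toList) (seqc.take pre)
      let new_start :=
        (PySem.List.min? (filtered.flatMap (fun p => [p.1, p.2])) (fun x => x)).getD 0 + 4
      filtered ++ aRec startc stopc min_len fuel newSeq new_start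

def get_orf_coords_for_forward_frame (seq : String) (start_codons : List String) (stop_codons : List String) (min_len : Int) (frame : Int) : List (Int × Int) :=
  aRec start_codons stop_codons min_len (seq.toList.length + 2) seq.toList frame

-- ===== PORT B =====
-- _codons: the slice loop
def bCodons : List Char → List String
  | a :: b :: c :: rest => String.mk [a, b, c] :: bCodons rest
  | _ => []

-- first loop of _orf_coords: label each codon with a run id (prefix count of stop-key
-- changes); state = (prev key : Option Bool, current id r); returns (rid list, final r)
def bRidLoop (stopc : List String) : List String → Option Bool → Int → List Int × Int
  | [], _, r => ([], r)
  | c :: rest, prev, r =>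
    if prev ≠ some (stopc.contains c) then
      ((r + 1) :: (bRidLoop stopc rest (some (stopc.contains c)) (r + 1)).1,
       (bRidLoop stopc rest (some (stopc.contains c)) (r + 1)).2)
    else
      (r :: (bRidLoop stopc rest prev r).1, (bRidLoop stopc rest prev r).2)

-- second loop of _orf_coords: for i, c in enumerate(codons): run_end[rid[i]] = i+1;
-- if c in start_codons and rid[i] not in first_start: first_start[rid[i]] = i
def bDicts (startc : List String) : List (Int × String) → Int → PySem.Dict Int Int → PySem.Dict Int Int → PySem.Dict Int Int × PySem.Dict Int Int
  | [], _, re, fs => (re, fs)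
  | (r, c) :: rest, i, re, fs =>
    bDicts startc rest (i + 1) (re.insert r (i + 1))
      (if startc.contains c && (fs.get? r).isNone then fs.insert r i else fs)

-- _orf_coords: run-id labelling, dict passes, then emission per id
def bOrfCoords (startc stopc : List String) (codons : List String) : List (Int × Int) :=
  let rr := bRidLoop stopc codons none (-1)
  let dd := bDicts startc (rr.1.zip codons) 0 PySem.Dict.empty PySem.Dict.empty
  (PySem.List.pyRange 0 (rr.2 + 1) 1).filterMap (fun q =>
    match dd.2.get? q with
    | some b => some (3 * b, 3 * dd.1.getD q 0)
    | none => none)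

-- the while loop of Source B, with its results accumulator; fuel only makes the loop total
-- (frame grows by ≥ 3 per iteration, so fuel = len+2 never runs out)
def bLoop (startc stopc : List String) (min_len : Int) : Nat → List Char → Int → List (Int × Int) → List (Int × Int)
  | 0, _, _, acc => acc
  | fuel + 1, seqc, frame, acc =>
    if (seqc.length : Int) < min_len then acc else
    let offset := (frame - 1).toNat
    let coords := (bOrfCoords startc stopc (bCodons (seqc.drop offset))).map
        (fun p => (p.1 + (offset : Int), p.2 + (offset : Int)))
    let filtered := coords.filter (fun p => decide (min_len ≤ p.2 - p.1))
    if filtered.isEmpty then acc ++ filtered else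
      let used := PySem.Set.ofList (coords.map (fun p => PySem.Int.floordiv p.1 3))
      let pre := offset % 3
      let parts := seqc.take pre ::
        (PySem.List.enumerate (bCodons (seqc.drop pre)) 0).map
          (fun q => if PySem.Set.contains used q.1 then ['.', '.', '.'] else q.2.toList)
      let seq2 := parts.flatten
      let frame' := (PySem.List.min? (filtered.map (fun p => p.1)) (fun x => x)).getD 0 + 4
      bLoop startc stopc min_len fuel seq2 frame' (acc ++ filtered)

def get_orf_coords_for_forward_frame_alt (seq : String) (start_codons : List String) (stop_codons : List String) (min_len : Int) (frame : Int) : List (Int × Int) :=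
  if frame < 1 then [] else       -- Python: assert frame >= 1 (excluded by Pre_)
  bLoop start_codons stop_codons min_len (seq.toList.length + 2) seq.toList frame []

-- ===== PRECONDITION & SPEC =====
-- Python A (and B) assert frame >= 1 and raise AssertionError otherwise; nothing else raises.
def Pre_get_orf_coords_for_forward_frame (seq : String) (start_codons : List String) (stop_codons : List String) (min_len : Int) (frame : Int) : Prop := 1 ≤ frame
instance (seq : String) (start_codons : List String) (stop_codons : List String) (min_len : Int) (frame : Int) : Decidable (Pre_get_orf_coords_for_forward_frame seq start_codons stop_codons min_len frame) := by unfold Pre_get_orf_coords_for_forward_frame; infer_instance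

def pvWitness_get_orf_coords_for_forward_frame : String × List String × List String × Int × Int :=
  ("ATGAAATAA", ["ATG"], ["TAA"], 3, 1)

def Spec_get_orf_coords_for_forward_frame (seq : String) (start_codons : List String) (stop_codons : List String) (min_len : Int) (frame : Int) (out : List (Int × Int)) : Prop := out = get_orf_coords_for_forward_frame_alt seq start_codons stop_codons min_len frame
instance (seq : String) (start_codons : List String) (stop_codons : List String) (min_len : Int) (frame : Int) (out : List (Int × Int)) : Decidable (Spec_get_orf_coords_for_forward_frame seq start_codons stop_codons min_len frame out) := by unfold Spec_get_orf_coords_for_forward_frame; infer_instance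

-- ===== CLAIM (what is proved, stated in full; the proofs are below) =====
def Claim_equal_get_orf_coords_for_forward_frame : Prop := ∀ (seq : String) (start_codons : List String) (stop_codons : List String) (min_len : Int) (frame : Int), Dom_get_orf_coords_for_forward_frame seq start_codons stop_codons min_len frame → Pre_get_orf_coords_for_forward_frame seq start_codons stop_codons min_len frame → Spec_get_orf_coords_for_forward_frame seq start_codons stop_codons min_len frame (get_orf_coords_for_forward_frame seq start_codons stop_codons min_len frame)

-- ===== LEMMAS AND PROOFS =====

-- the two chunkings are the same function
theorem codons_eq : ∀ l : List Char, bCodons l = aGetCodons l := by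
  intro l
  induction l using bCodons.induct <;> simp [bCodons, aGetCodons, *]

-- A's pipeline after groupby, as a function of the group list (proof-side helpers)
def phi (E L : List Nat) : List (Int × Int) :=
  (E.zip L).map (fun p => (3 * ((p.1 : Int) - p.2), 3 * (p.1 : Int)))

theorem zipform_eq_phi (E L : List Nat) :
    ((((E.zip L).map (fun p => (p.1 : Int) - (p.2 : Int))).map (fun b => 3 * b)).zip
      (E.map (fun e => 3 * (e : Int)))) = phi E L := by
  induction E generalizing L with
  | nil => simp [phi]
  | cons e E ih => cases L with
    | nil => simp [phi]
    | cons l L => simp [phi] at ih ⊢; exact ih L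

def lenListP (startc : List String) (groups : List (List String)) : List Nat :=
  (groups.map (fun g => g.dropWhile (fun x => !(startc.contains x)))).map List.length
def idxP (startc : List String) (groups : List (List String)) : List Bool :=
  (lenListP startc groups).map (fun n => n != 0)
def acoreP (startc : List String) (groups : List (List String)) : List (Int × Int) :=
  phi (aCompress (aAccumulate (groups.map List.length) 0) (idxP startc groups))
      (aCompress (lenListP startc groups) (idxP startc groups))

theorem aOrfCoords_eq_acoreP (startc stopc : List String) (seqc : List Char) :
    aOrfCoords startc stopc seqc =
      acoreP startc (aGroupby (fun c => stopc.contains c) (aGetCodons seqc)) := by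
  simp only [aOrfCoords, acoreP, lenListP, idxP]
  rw [zipform_eq_phi]

theorem phi_shift (a : Nat) (E L : List Nat) :
    phi (E.map (fun x => a + x)) L = (phi E L).map (fun p => (p.1 + 3 * (a : Int), p.2 + 3 * (a : Int))) := by
  induction E generalizing L with
  | nil => simp [phi]
  | cons e E ih => cases L with
    | nil => simp [phi]
    | cons l L =>
      simp [phi] at ih ⊢
      refine ⟨⟨by ring, by ring⟩, ih L⟩

theorem aAccumulate_shift (l : List Nat) (a : Nat) :
    aAccumulate l a = (aAccumulate l 0).map (fun x => a + x) := by
  induction l generalizing a with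
  | nil => simp [aAccumulate]
  | cons x xs ih =>
    simp only [aAccumulate, List.map_cons, Nat.zero_add]
    congr 1
    rw [ih (a + x), ih x, List.map_map]
    exact List.map_congr_left (fun y _ => by simp; omega)

theorem aCompress_map (f : Nat → Nat) (l : List Nat) (bs : List Bool) :
    aCompress (l.map f) bs = (aCompress l bs).map f := by
  induction l generalizing bs with
  | nil => simp [aCompress]
  | cons x xs ih => cases bs with
    | nil => simp [aCompress]
    | cons b bs => cases b <;> simp [aCompress, ih]

theorem phi_cons (e l : Nat) (E L : List Nat) :
    phi (e :: E) (l :: L) = (3 * ((e : Int) - l), 3 * (e : Int)) :: phi E L := rfl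

theorem acoreP_cons (startc : List String) (g : List String) (gs : List (List String)) :
    acoreP startc (g :: gs) =
      (let dw := g.dropWhile (fun x => !(startc.contains x))
       if dw.isEmpty then ([] : List (Int × Int))
       else [(3 * ((g.length : Int) - dw.length), 3 * (g.length : Int))]) ++
      (acoreP startc gs).map (fun p => (p.1 + 3 * (g.length : Int), p.2 + 3 * (g.length : Int))) := by
  simp only [acoreP, lenListP, idxP, List.map_cons, aAccumulate, Nat.zero_add]
  rw [aAccumulate_shift]
  by_cases h : (g.dropWhile (fun x => !(startc.contains x))).length = 0
  · have hb : (((g.dropWhile (fun x => !(startc.contains x))).length) != 0) = false := by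
      exact bne_eq_false_iff_eq.mpr h
    have hbe : (g.dropWhile (fun x => !(startc.contains x))).isEmpty = true := by
      exact List.isEmpty_iff.mpr (List.length_eq_zero_iff.mp h)
    simp only [hb, hbe, aCompress, Bool.false_eq_true, if_false, if_true, List.nil_append]
    rw [aCompress_map, phi_shift]
  · have hb : (((g.dropWhile (fun x => !(startc.contains x))).length) != 0) = true := bne_iff_ne.mpr h
    have hbe : (g.dropWhile (fun x => !(startc.contains x))).isEmpty = false := by
      rw [List.isEmpty_eq_false_iff]
      exact fun he => h (by rw [he]; rfl)
    simp only [hb, hbe, aCompress, Bool.false_eq_true, if_false, if_true]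
    rw [aCompress_map, phi_cons, phi_shift]
    simp

-- ----- spec functions for B's dict loops (proof side) -----

-- first index i with rid = q and a start codon, scanning left to right
def fsSpec (startc : List String) : List (Int × String) → Int → Int → Option Int
  | [], _, _ => none
  | (r, c) :: rest, i, q =>
    (if r = q ∧ startc.contains c = true then some i else none).or
      (fsSpec startc rest (i + 1) q)

-- last i+1 with rid = q
def leSpec : List (Int × String) → Int → Int → Option Int
  | [], _, _ => none
  | (r, _) :: rest, i, q =>
    (leSpec rest (i + 1) q).or (if r = q then some (i + 1) else none)

theorem fsSpec_cons (startc : List String) (r : Int) (c : String)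
    (rest : List (Int × String)) (i q : Int) :
    fsSpec startc ((r, c) :: rest) i q =
      (if r = q ∧ startc.contains c = true then some i else none).or
        (fsSpec startc rest (i + 1) q) := rfl

theorem leSpec_cons (r : Int) (c : String) (rest : List (Int × String)) (i q : Int) :
    leSpec ((r, c) :: rest) i q =
      (leSpec rest (i + 1) q).or (if r = q then some (i + 1) else none) := rfl

theorem bDicts_fst_get (startc : List String) : ∀ (ps : List (Int × String)) (i : Int)
    (re fs : PySem.Dict Int Int) (q : Int),
    ((bDicts startc ps i re fs).1).get? q = (leSpec ps i q).or (re.get? q) := by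
  intro ps
  induction ps with
  | nil => intro i re fs q; simp [bDicts, leSpec]
  | cons a ps ih =>
    obtain ⟨r, c⟩ := a
    intro i re fs q
    simp only [bDicts, leSpec]
    rw [ih, Option.or_assoc]
    cases h : leSpec ps (i + 1) q with
    | some v => simp
    | none =>
      simp only [Option.none_or]
      rw [PySem.Dict.get?_insert]
      by_cases hq : q = r
      · subst hq
        simp
      · rw [if_neg hq, if_neg (fun e => hq e.symm), Option.none_or]

theorem bDicts_snd_get (startc : List String) : ∀ (ps : List (Int × String)) (i : Int)
    (re fs : PySem.Dict Int Int) (q : Int),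
    ((bDicts startc ps i re fs).2).get? q = (fs.get? q).or (fsSpec startc ps i q) := by
  intro ps
  induction ps with
  | nil => intro i re fs q; simp [bDicts, fsSpec]
  | cons a ps ih =>
    obtain ⟨r, c⟩ := a
    intro i re fs q
    simp only [bDicts, fsSpec]
    rw [ih]
    by_cases hc : (startc.contains c && (fs.get? r).isNone) = true
    · rw [if_pos hc]
      have hc1 : startc.contains c = true := by
        cases hcc : startc.contains c
        · rw [hcc] at hc; simp at hc
        · rfl
      have hc2 : fs.get? r = none := by
        cases hfr : fs.get? r
        · rfl
        · rw [hfr] at hc; simp at hc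
      by_cases hq : q = r
      · subst hq
        rw [PySem.Dict.get?_insert_self, hc2, if_pos ⟨rfl, hc1⟩]
        simp
      · rw [PySem.Dict.get?_insert]
        rw [if_neg hq, if_neg (fun e => hq e.1.symm)]
        cases fs.get? q <;> simp
    · rw [if_neg hc]
      cases hfq : fs.get? q with
      | some w => simp
      | none =>
        simp only [Option.none_or]
        have hcond : ¬ (r = q ∧ startc.contains c = true) := by
          rintro ⟨rfl, hcc⟩
          apply hc
          rw [hcc, hfq]
          rfl
        rw [if_neg hcond]
        simp

def outSpec (startc : List String) (ps : List (Int × String)) (n : Int) : List (Int × Int) :=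
  (PySem.List.pyRange 0 n 1).filterMap (fun q =>
    (fsSpec startc ps 0 q).map (fun b => (3 * b, 3 * (leSpec ps 0 q).getD 0)))

theorem bOrfCoords_eq_outSpec (startc stopc : List String) (codons : List String) :
    bOrfCoords startc stopc codons =
      outSpec startc ((bRidLoop stopc codons none (-1)).1.zip codons)
        ((bRidLoop stopc codons none (-1)).2 + 1) := by
  simp only [bOrfCoords, outSpec]
  refine List.filterMap_congr (fun q _ => ?_)
  rw [PySem.Dict.getD_eq_get?_getD, bDicts_snd_get, bDicts_fst_get,
    PySem.Dict.get?_empty, Option.none_or, Option.or_none]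
  cases h : fsSpec startc ((bRidLoop stopc codons none (-1)).1.zip codons) 0 q <;> simp

-- ----- structure of the rid labelling -----

theorem bRidLoop_cons (stopc : List String) (c : String) (rest : List String)
    (prev : Option Bool) (r : Int) :
    bRidLoop stopc (c :: rest) prev r =
      if prev ≠ some (stopc.contains c) then
        ((r + 1) :: (bRidLoop stopc rest (some (stopc.contains c)) (r + 1)).1,
         (bRidLoop stopc rest (some (stopc.contains c)) (r + 1)).2)
      else (r :: (bRidLoop stopc rest prev r).1, (bRidLoop stopc rest prev r).2) := rfl

theorem bRid_len (stopc : List String) : ∀ (l : List String) (prev : Option Bool) (r : Int),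
    ((bRidLoop stopc l prev r).1).length = l.length := by
  intro l
  induction l with
  | nil => intro prev r; simp [bRidLoop]
  | cons c rest ih =>
    intro prev r
    rw [bRidLoop_cons]
    by_cases h : prev ≠ some (stopc.contains c)
    · rw [if_pos h]; simp [ih]
    · rw [if_neg h]; simp [ih]

theorem bRid_snd_ge (stopc : List String) : ∀ (l : List String) (prev : Option Bool) (r : Int),
    r ≤ (bRidLoop stopc l prev r).2 := by
  intro l
  induction l with
  | nil => intro prev r; simp [bRidLoop]
  | cons c rest ih =>
    intro prev r
    rw [bRidLoop_cons]
    by_cases h : prev ≠ some (stopc.contains c)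
    · rw [if_pos h]
      have := ih (some (stopc.contains c)) (r + 1)
      dsimp only
      omega
    · rw [if_neg h]
      exact ih prev r

theorem bRid_mem_ge (stopc : List String) : ∀ (l : List String) (prev : Option Bool) (r x : Int),
    x ∈ ((bRidLoop stopc l prev r).1) → r ≤ x := by
  intro l
  induction l with
  | nil => intro prev r x hx; simp [bRidLoop] at hx
  | cons c rest ih =>
    intro prev r x hx
    rw [bRidLoop_cons] at hx
    by_cases h : prev ≠ some (stopc.contains c)
    · rw [if_pos h] at hx
      simp only [List.mem_cons] at hx
      rcases hx with rfl | hx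
      · omega
      · have := ih (some (stopc.contains c)) (r + 1) x hx
        omega
    · rw [if_neg h] at hx
      simp only [List.mem_cons] at hx
      rcases hx with rfl | hx
      · omega
      · exact ih prev r x hx

theorem bRid_none_mem_ge (stopc : List String) : ∀ (l : List String) (r x : Int),
    x ∈ ((bRidLoop stopc l none r).1) → r + 1 ≤ x := by
  intro l r x hx
  cases l with
  | nil => simp [bRidLoop] at hx
  | cons c rest =>
    have hne : (none : Option Bool) ≠ some (stopc.contains c) := by simp
    rw [bRidLoop_cons, if_pos hne] at hx
    simp only [List.mem_cons] at hx
    rcases hx with rfl | hx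
    · omega
    · exact bRid_mem_ge stopc rest (some (stopc.contains c)) (r + 1) x hx

theorem bRid_shift (stopc : List String) : ∀ (l : List String) (prev : Option Bool) (r : Int),
    bRidLoop stopc l prev r =
      (((bRidLoop stopc l prev 0).1).map (· + r), (bRidLoop stopc l prev 0).2 + r) := by
  intro l
  induction l with
  | nil => intro prev r; simp [bRidLoop]
  | cons c rest ih =>
    intro prev r
    rw [bRidLoop_cons, bRidLoop_cons]
    by_cases h : prev ≠ some (stopc.contains c)
    · rw [if_pos h, if_pos h, ih (some (stopc.contains c)) (r + 1),
        ih (some (stopc.contains c)) (0 + 1)]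
      refine Prod.ext ?_ ?_
      · dsimp only
        simp only [List.map_cons, List.map_map]
        refine List.cons_eq_cons.mpr ⟨by omega, ?_⟩
        exact List.map_congr_left (fun x _ => by dsimp only [Function.comp]; omega)
      · dsimp only
        omega
    · rw [if_neg h, if_neg h, ih prev r]
      refine Prod.ext ?_ ?_
      · dsimp only
        simp only [List.map_cons]
        refine List.cons_eq_cons.mpr ⟨by omega, rfl⟩
      · rfl

theorem bRid_uniform (stopc : List String) : ∀ (t d : List String) (k : Bool) (r : Int),
    (∀ x ∈ t, stopc.contains x = k) →
    bRidLoop stopc (t ++ d) (some k) r =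
      (List.replicate t.length r ++ (bRidLoop stopc d (some k) r).1,
       (bRidLoop stopc d (some k) r).2) := by
  intro t
  induction t with
  | nil => intro d k r _; simp
  | cons x t ih =>
    intro d k r h
    have hx : stopc.contains x = k := h x List.mem_cons_self
    have hne : ¬ ((some k : Option Bool) ≠ some (stopc.contains x)) := fun hcon => hcon (by rw [hx])
    rw [List.cons_append, bRidLoop_cons, if_neg hne,
      ih d k r (fun y hy => h y (List.mem_cons_of_mem _ hy))]
    refine Prod.ext ?_ ?_
    · dsimp only
      simp [List.replicate_succ]
    · rfl

theorem bRid_fresh (stopc : List String) : ∀ (d : List String) (k : Bool) (r : Int),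
    (∀ c rest, d = c :: rest → stopc.contains c ≠ k) →
    bRidLoop stopc d (some k) r = bRidLoop stopc d none r := by
  intro d k r h
  cases d with
  | nil => rfl
  | cons c rest =>
    have hc : stopc.contains c ≠ k := h c rest rfl
    have h1 : (some k : Option Bool) ≠ some (stopc.contains c) :=
      fun e => hc (Option.some.inj e).symm
    have h2 : (none : Option Bool) ≠ some (stopc.contains c) := by simp
    rw [bRidLoop_cons, bRidLoop_cons, if_pos h1, if_pos h2]

theorem dropWhile_head_false {α : Type} (p : α → Bool) :
    ∀ (l : List α) (c : α) (rest : List α), l.dropWhile p = c :: rest → p c = false := by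
  intro l
  induction l with
  | nil => intro c rest h; simp [List.dropWhile] at h
  | cons a l ih =>
    intro c rest h
    rw [List.dropWhile_cons] at h
    by_cases ha : p a = true
    · rw [if_pos ha] at h
      exact ih c rest h
    · rw [if_neg ha] at h
      cases h
      exact Bool.eq_false_iff.mpr ha

theorem bRid_decomp (stopc : List String) (c : String) (rest : List String) :
    bRidLoop stopc (c :: rest) none (-1) =
      (List.replicate ((rest.takeWhile (fun x => stopc.contains x == stopc.contains c)).length + 1) 0 ++
         (((bRidLoop stopc (rest.dropWhile (fun x => stopc.contains x == stopc.contains c)) none (-1)).1).map (· + 1)),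
       (bRidLoop stopc (rest.dropWhile (fun x => stopc.contains x == stopc.contains c)) none (-1)).2 + 1) := by
  have h2 : (none : Option Bool) ≠ some (stopc.contains c) := by simp
  rw [bRidLoop_cons, if_pos h2]
  have hm1 : (-1 : Int) + 1 = 0 := by norm_num
  rw [hm1]
  conv_lhs => rw [show rest = rest.takeWhile (fun x => stopc.contains x == stopc.contains c) ++
      rest.dropWhile (fun x => stopc.contains x == stopc.contains c) from
      (List.takeWhile_append_dropWhile).symm]
  rw [bRid_uniform stopc _ _ _ 0 (fun x hx => by
    have := List.mem_takeWhile_imp hx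
    simpa using this)]
  rw [bRid_fresh stopc _ _ 0 (fun c' rest' hd => by
    have := dropWhile_head_false _ rest c' rest' hd
    simpa using this)]
  rw [bRid_shift stopc (rest.dropWhile (fun x => stopc.contains x == stopc.contains c)) none (-1)]
  refine Prod.ext ?_ ?_
  · dsimp only
    rw [List.replicate_succ, List.cons_append, List.map_map]
    refine List.cons_eq_cons.mpr ⟨rfl, ?_⟩
    congr 1
    exact ((List.map_congr_left (fun x _ => by dsimp; omega)).trans (List.map_id _)).symm
  · dsimp only
    omega

-- ----- fsSpec / leSpec algebra -----

theorem fsSpec_append (startc : List String) : ∀ (p p' : List (Int × String)) (i q : Int),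
    fsSpec startc (p ++ p') i q = (fsSpec startc p i q).or (fsSpec startc p' (i + p.length) q) := by
  intro p p'
  induction p with
  | nil => intro i q; simp [fsSpec]
  | cons a p ih =>
    obtain ⟨r, c⟩ := a
    intro i q
    simp only [List.cons_append, fsSpec, List.length_cons]
    rw [ih (i + 1), Option.or_assoc]
    congr 2
    push_cast
    ring

theorem leSpec_append : ∀ (p p' : List (Int × String)) (i q : Int),
    leSpec (p ++ p') i q = (leSpec p' (i + p.length) q).or (leSpec p i q) := by
  intro p p'
  induction p with
  | nil => intro i q; simp [leSpec]
  | cons a p ih =>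
    obtain ⟨r, c⟩ := a
    intro i q
    simp only [List.cons_append, leSpec, List.length_cons]
    rw [ih (i + 1), Option.or_assoc]
    congr 2
    push_cast
    ring

theorem fsSpec_ne (startc : List String) : ∀ (ps : List (Int × String)) (i q : Int),
    (∀ p ∈ ps, p.1 ≠ q) → fsSpec startc ps i q = none := by
  intro ps
  induction ps with
  | nil => intro i q _; rfl
  | cons a ps ih =>
    obtain ⟨r, c⟩ := a
    intro i q h
    have hr : r ≠ q := h (r, c) List.mem_cons_self
    simp only [fsSpec, if_neg (fun hh : r = q ∧ _ => hr hh.1), Option.none_or]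
    exact ih (i + 1) q (fun p hp => h p (List.mem_cons_of_mem _ hp))

theorem leSpec_ne : ∀ (ps : List (Int × String)) (i q : Int),
    (∀ p ∈ ps, p.1 ≠ q) → leSpec ps i q = none := by
  intro ps
  induction ps with
  | nil => intro i q _; rfl
  | cons a ps ih =>
    obtain ⟨r, c⟩ := a
    intro i q h
    have hr : r ≠ q := h (r, c) List.mem_cons_self
    simp only [leSpec, if_neg hr, Option.or_none]
    exact ih (i + 1) q (fun p hp => h p (List.mem_cons_of_mem _ hp))

theorem fsSpec_idx (startc : List String) : ∀ (ps : List (Int × String)) (i q : Int),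
    fsSpec startc ps i q = (fsSpec startc ps 0 q).map (· + i) := by
  intro ps
  induction ps with
  | nil => intro i q; simp [fsSpec]
  | cons a ps ih =>
    obtain ⟨r, c⟩ := a
    intro i q
    simp only [fsSpec]
    by_cases h : r = q ∧ startc.contains c = true
    · rw [if_pos h, if_pos h, Option.some_or, Option.some_or]
      simp
    · rw [if_neg h, if_neg h, Option.none_or, Option.none_or, ih (i + 1) q, ih (0 + 1) q,
        Option.map_map]
      cases hb : fsSpec startc ps 0 q with
      | none => simp
      | some b => simp only [hb, Option.map_some, Option.some_inj, Function.comp_apply]; ring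

theorem leSpec_idx : ∀ (ps : List (Int × String)) (i q : Int),
    leSpec ps i q = (leSpec ps 0 q).map (· + i) := by
  intro ps
  induction ps with
  | nil => intro i q; simp [leSpec]
  | cons a ps ih =>
    obtain ⟨r, c⟩ := a
    intro i q
    simp only [leSpec]
    rw [ih (i + 1) q, ih (0 + 1) q]
    cases hb : leSpec ps 0 q with
    | some v =>
      simp only [hb, Option.map_some, Option.some_or, Option.some_inj]
      ring
    | none =>
      simp only [hb, Option.map_none, Option.none_or]
      by_cases h : r = q
      · rw [if_pos h, if_pos h]
        simp only [Option.map_some, Option.some_inj]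
        ring
      · rw [if_neg h, if_neg h]
        rfl

theorem fsSpec_mapfst (startc : List String) : ∀ (rid : List Int) (d : List String) (i q : Int),
    fsSpec startc ((rid.map (· + 1)).zip d) i (q + 1) = fsSpec startc (rid.zip d) i q := by
  intro rid
  induction rid with
  | nil => intro d i q; simp [fsSpec]
  | cons r rid ih =>
    intro d i q
    cases d with
    | nil => simp [fsSpec]
    | cons c d =>
      simp only [List.map_cons, List.zip_cons_cons, fsSpec]
      by_cases h : r = q ∧ startc.contains c = true
      · rw [if_pos ⟨by omega, h.2⟩, if_pos h, ih]
      · rw [if_neg (fun hh => h ⟨by omega, hh.2⟩), if_neg h, ih]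

theorem leSpec_mapfst : ∀ (rid : List Int) (d : List String) (i q : Int),
    leSpec ((rid.map (· + 1)).zip d) i (q + 1) = leSpec (rid.zip d) i q := by
  intro rid
  induction rid with
  | nil => intro d i q; simp [leSpec]
  | cons r rid ih =>
    intro d i q
    cases d with
    | nil => simp [leSpec]
    | cons c d =>
      simp only [List.map_cons, List.zip_cons_cons, leSpec]
      rw [ih]
      by_cases h : r = q
      · rw [if_pos (by omega : r + 1 = q + 1), if_pos h]
      · rw [if_neg (by omega : ¬ r + 1 = q + 1), if_neg h]

theorem fsSpec_grp (startc : List String) : ∀ (g : List String) (i : Int),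
    fsSpec startc ((List.replicate g.length (0 : Int)).zip g) i 0 =
      (if (g.dropWhile (fun x => !(startc.contains x))).isEmpty then none
       else some (i + ((g.takeWhile (fun x => !(startc.contains x))).length : Int))) := by
  intro g
  induction g with
  | nil => intro i; simp [fsSpec]
  | cons c g ih =>
    intro i
    simp only [List.length_cons, List.replicate_succ, List.zip_cons_cons]
    rw [fsSpec_cons]
    by_cases hs : startc.contains c = true
    · have hdw : (c :: g).dropWhile (fun x => !(startc.contains x)) = c :: g := by
        rw [List.dropWhile_cons, if_neg (by simpa using hs)]
      have htw : (c :: g).takeWhile (fun x => !(startc.contains x)) = [] := by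
        rw [List.takeWhile_cons, if_neg (by simpa using hs)]
      rw [if_pos ⟨rfl, hs⟩, Option.some_or, hdw, htw]
      simp
    · have hs' : startc.contains c = false := Bool.eq_false_iff.mpr hs
      have hdw : (c :: g).dropWhile (fun x => !(startc.contains x)) =
          g.dropWhile (fun x => !(startc.contains x)) := by
        rw [List.dropWhile_cons, if_pos (by simpa using hs')]
      have htw : (c :: g).takeWhile (fun x => !(startc.contains x)) =
          c :: g.takeWhile (fun x => !(startc.contains x)) := by
        rw [List.takeWhile_cons, if_pos (by simpa using hs')]
      rw [if_neg (fun hh => hs hh.2), Option.none_or, ih (i + 1), hdw, htw, List.length_cons]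
      split_ifs with hcase
      · rfl
      · congr 1
        push_cast
        ring

theorem leSpec_grp : ∀ (g : List String) (i : Int),
    leSpec ((List.replicate g.length (0 : Int)).zip g) i 0 =
      (if g.isEmpty then none else some (i + (g.length : Int))) := by
  intro g
  induction g with
  | nil => intro i; simp [leSpec]
  | cons c g ih =>
    intro i
    simp only [List.length_cons, List.replicate_succ, List.zip_cons_cons]
    rw [leSpec_cons, ih (i + 1)]
    by_cases hg : g.isEmpty = true
    · have hge : g = [] := List.isEmpty_iff.mp hg
      subst hge
      simp
    · rw [if_neg hg, Option.some_or, if_neg (by simp)]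
      congr 1
      push_cast
      ring

theorem leSpec_gt : ∀ (ps : List (Int × String)) (i q v : Int), leSpec ps i q = some v → i < v := by
  intro ps
  induction ps with
  | nil => intro i q v h; simp [leSpec] at h
  | cons a ps ih =>
    obtain ⟨r, c⟩ := a
    intro i q v h
    simp only [leSpec] at h
    cases hb : leSpec ps (i + 1) q with
    | some w =>
      rw [hb, Option.some_or] at h
      have hwv : w = v := by injection h
      have := ih (i + 1) q w hb
      omega
    | none =>
      rw [hb, Option.none_or] at h
      by_cases hr : r = q
      · rw [if_pos hr] at h
        cases h
        omega
      · rw [if_neg hr] at h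
        simp at h

theorem fsSpec_bounds (startc : List String) : ∀ (ps : List (Int × String)) (i q b : Int),
    fsSpec startc ps i q = some b →
      i ≤ b ∧ ∃ v, leSpec ps i q = some v ∧ b < v := by
  intro ps
  induction ps with
  | nil => intro i q b h; simp [fsSpec] at h
  | cons a ps ih =>
    obtain ⟨r, c⟩ := a
    intro i q b h
    simp only [fsSpec] at h
    simp only [leSpec]
    by_cases hcond : r = q ∧ startc.contains c = true
    · rw [if_pos hcond, Option.some_or] at h
      cases h
      refine ⟨le_refl i, ?_⟩
      cases hb2 : leSpec ps (i + 1) q with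
      | some w =>
        refine ⟨w, by simp, ?_⟩
        have := leSpec_gt ps (i + 1) q w hb2
        omega
      | none =>
        refine ⟨i + 1, ?_, by omega⟩
        rw [Option.none_or, if_pos hcond.1]
    · rw [if_neg hcond, Option.none_or] at h
      obtain ⟨hib, v, hv, hbv⟩ := ih (i + 1) q b h
      exact ⟨by omega, v, by simp [hv], hbv⟩

theorem pyRange_shift (n : Int) :
    PySem.List.pyRange 1 (n + 1) 1 = (PySem.List.pyRange 0 n 1).map (fun q => q + 1) := by
  rw [PySem.List.pyRange_one, PySem.List.pyRange_one, List.map_map]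
  have h : (n + 1 - 1).toNat = (n - 0).toNat := by omega
  rw [h]
  exact List.map_congr_left (fun k _ => by simp; ring)

-- one group peeled off the front of outSpec
theorem outSpec_decomp (startc : List String) (g d : List String) (rid : List Int) (r : Int)
    (hg : g ≠ []) (hridlen : rid.length = d.length)
    (hridnn : ∀ x ∈ rid, 0 ≤ x) (hr : -1 ≤ r) :
    outSpec startc ((List.replicate g.length (0 : Int) ++ rid.map (· + 1)).zip (g ++ d)) (r + 2) =
      (if (g.dropWhile (fun x => !(startc.contains x))).isEmpty then ([] : List (Int × Int))
       else [(3 * ((g.takeWhile (fun x => !(startc.contains x))).length : Int), 3 * (g.length : Int))]) ++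
      (outSpec startc (rid.zip d) (r + 1)).map
        (fun p => (p.1 + 3 * (g.length : Int), p.2 + 3 * (g.length : Int))) := by
  have hzip : (List.replicate g.length (0 : Int) ++ rid.map (· + 1)).zip (g ++ d) =
      (List.replicate g.length (0 : Int)).zip g ++ (rid.map (· + 1)).zip d :=
    List.zip_append (by simp)
  have hp0len : ((List.replicate g.length (0 : Int)).zip g).length = g.length := by
    simp
  have hmem0 : ∀ p ∈ (List.replicate g.length (0 : Int)).zip g, p.1 = 0 := by
    intro p hp
    exact List.eq_of_mem_replicate (List.of_mem_zip hp).1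
  have hmem1 : ∀ p ∈ (rid.map (· + 1)).zip d, 1 ≤ p.1 := by
    intro p hp
    obtain ⟨x, hx, hpx⟩ := List.mem_map.mp (List.of_mem_zip hp).1
    have := hridnn x hx
    omega
  rw [hzip]
  unfold outSpec
  rw [PySem.List.pyRange_one_cons (by omega : (0 : Int) < r + 2)]
  simp only [List.filterMap_cons]
  -- head entry (q = 0)
  have hfs0 : fsSpec startc ((List.replicate g.length (0 : Int)).zip g ++ (rid.map (· + 1)).zip d) 0 0 =
      fsSpec startc ((List.replicate g.length (0 : Int)).zip g) 0 0 := by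
    rw [fsSpec_append]
    rw [fsSpec_ne startc ((rid.map (· + 1)).zip d)
      (0 + (((List.replicate g.length (0 : Int)).zip g).length : Int)) 0
      (fun p hp => by have := hmem1 p hp; omega)]
    exact Option.or_none
  have hle0 : leSpec ((List.replicate g.length (0 : Int)).zip g ++ (rid.map (· + 1)).zip d) 0 0 =
      some (g.length : Int) := by
    rw [leSpec_append]
    rw [leSpec_ne ((rid.map (· + 1)).zip d)
      (0 + (((List.replicate g.length (0 : Int)).zip g).length : Int)) 0
      (fun p hp => by have := hmem1 p hp; omega)]
    rw [Option.none_or, leSpec_grp]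
    rw [if_neg (by simpa using hg)]
    norm_num
  -- tail entries (q = q' + 1)
  have htail : (PySem.List.pyRange 1 (r + 2) 1).filterMap (fun q =>
        (fsSpec startc ((List.replicate g.length (0 : Int)).zip g ++ (rid.map (· + 1)).zip d) 0 q).map
          (fun b => (3 * b, 3 * (leSpec ((List.replicate g.length (0 : Int)).zip g ++ (rid.map (· + 1)).zip d) 0 q).getD 0))) =
      ((PySem.List.pyRange 0 (r + 1) 1).filterMap (fun q =>
        (fsSpec startc (rid.zip d) 0 q).map
          (fun b => (3 * b, 3 * (leSpec (rid.zip d) 0 q).getD 0)))).map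
        (fun p => (p.1 + 3 * (g.length : Int), p.2 + 3 * (g.length : Int))) := by
    rw [show r + 2 = (r + 1) + 1 by ring, pyRange_shift]
    rw [List.filterMap_map, List.map_filterMap]
    refine List.filterMap_congr (fun q hq => ?_)
    have hq0 : 0 ≤ q := (PySem.List.mem_pyRange_one.mp hq).1
    have hfs : fsSpec startc ((List.replicate g.length (0 : Int)).zip g ++ (rid.map (· + 1)).zip d) 0 (q + 1) =
        (fsSpec startc (rid.zip d) 0 q).map (· + (g.length : Int)) := by
      rw [fsSpec_append]
      rw [fsSpec_ne startc ((List.replicate g.length (0 : Int)).zip g) 0 (q + 1)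
        (fun p hp => by have := hmem0 p hp; omega)]
      rw [Option.none_or, fsSpec_idx, fsSpec_mapfst]
      congr 1
      funext x
      simp [hp0len]
    have hle : leSpec ((List.replicate g.length (0 : Int)).zip g ++ (rid.map (· + 1)).zip d) 0 (q + 1) =
        (leSpec (rid.zip d) 0 q).map (· + (g.length : Int)) := by
      rw [leSpec_append]
      rw [leSpec_ne ((List.replicate g.length (0 : Int)).zip g) 0 (q + 1)
        (fun p hp => by have := hmem0 p hp; omega)]
      rw [Option.or_none, leSpec_idx, leSpec_mapfst]
      congr 1
      funext x
      simp [hp0len]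
    simp only [Function.comp]
    rw [hfs, hle]
    cases hb : fsSpec startc (rid.zip d) 0 q with
    | none => simp
    | some b =>
      obtain ⟨hb0, v, hv, hbv⟩ := fsSpec_bounds startc (rid.zip d) 0 q b hb
      rw [hv]
      simp only [Option.map_some, Option.getD_some]
      congr 1
      refine Prod.ext ?_ ?_ <;> dsimp only <;> ring
  rw [hfs0, hle0, fsSpec_grp]
  rw [show (0 : Int) + 1 = 1 from by norm_num, htail]
  by_cases hde : (g.dropWhile (fun x => !(startc.contains x))).isEmpty = true
  · rw [if_pos hde, if_pos hde]
    simp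
  · rw [if_neg hde, if_neg hde]
    simp

-- B's core equals A's pipeline on every codon list
theorem bOrf_eq_acore (startc stopc : List String) :
    ∀ codons, bOrfCoords startc stopc codons =
      acoreP startc (aGroupby (fun c => stopc.contains c) codons) := by
  have main : ∀ (n : Nat) (codons : List String), codons.length ≤ n →
      bOrfCoords startc stopc codons =
        acoreP startc (aGroupby (fun c => stopc.contains c) codons) := by
    intro n
    induction n with
    | zero =>
      intro codons hn
      have : codons = [] := List.length_eq_zero_iff.mp (Nat.le_zero.mp hn)
      subst this
      rw [bOrfCoords_eq_outSpec]
      simp [outSpec, bRidLoop, aGroupby, acoreP, lenListP, idxP, aAccumulate, aCompress, phi,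
        PySem.List.pyRange_one_eq_nil]
    | succ n ihn =>
      intro codons hn
      cases codons with
      | nil =>
        rw [bOrfCoords_eq_outSpec]
        simp [outSpec, bRidLoop, aGroupby, acoreP, lenListP, idxP, aAccumulate, aCompress, phi,
          PySem.List.pyRange_one_eq_nil]
      | cons c rest =>
        have hgb : aGroupby (fun x => stopc.contains x) (c :: rest) =
            (c :: rest.takeWhile (fun x => stopc.contains x == stopc.contains c)) ::
              aGroupby (fun x => stopc.contains x)
                (rest.dropWhile (fun x => stopc.contains x == stopc.contains c)) := by
          simp [aGroupby]
        rw [hgb, acoreP_cons, bOrfCoords_eq_outSpec, bRid_decomp]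
        have hlrepl : (rest.takeWhile (fun x => stopc.contains x == stopc.contains c)).length + 1 =
            (c :: rest.takeWhile (fun x => stopc.contains x == stopc.contains c)).length := by
          simp
        have hsplit : (c :: rest) = (c :: rest.takeWhile (fun x => stopc.contains x == stopc.contains c)) ++
            rest.dropWhile (fun x => stopc.contains x == stopc.contains c) := by
          simp [List.takeWhile_append_dropWhile]
        dsimp only
        rw [hlrepl]
        rw [show (bRidLoop stopc (rest.dropWhile (fun x => stopc.contains x == stopc.contains c)) none (-1)).2 + 1 + 1 =
            (bRidLoop stopc (rest.dropWhile (fun x => stopc.contains x == stopc.contains c)) none (-1)).2 + 2 from by ring]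
        conv_lhs => rw [hsplit]
        rw [outSpec_decomp startc
          (c :: rest.takeWhile (fun x => stopc.contains x == stopc.contains c))
          (rest.dropWhile (fun x => stopc.contains x == stopc.contains c))
          ((bRidLoop stopc (rest.dropWhile (fun x => stopc.contains x == stopc.contains c)) none (-1)).1)
          ((bRidLoop stopc (rest.dropWhile (fun x => stopc.contains x == stopc.contains c)) none (-1)).2)
          (by simp)
          (bRid_len stopc _ none (-1))
          (fun x hx => by
            have := bRid_none_mem_ge stopc _ (-1) x hx
            omega)
          (bRid_snd_ge stopc _ none (-1))]
        have hih : outSpec startc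
            (((bRidLoop stopc (rest.dropWhile (fun x => stopc.contains x == stopc.contains c)) none (-1)).1).zip
              (rest.dropWhile (fun x => stopc.contains x == stopc.contains c)))
            ((bRidLoop stopc (rest.dropWhile (fun x => stopc.contains x == stopc.contains c)) none (-1)).2 + 1) =
            acoreP startc (aGroupby (fun x => stopc.contains x)
              (rest.dropWhile (fun x => stopc.contains x == stopc.contains c))) := by
          rw [← bOrfCoords_eq_outSpec]
          refine ihn _ ?_
          have := List.length_dropWhile_le (fun x => stopc.contains x == stopc.contains c) rest
          simp at hn
          omega
        rw [hih]
        congr 1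
        have hlen : ((c :: rest.takeWhile (fun x => stopc.contains x == stopc.contains c)).takeWhile
              (fun x => !(startc.contains x))).length +
            ((c :: rest.takeWhile (fun x => stopc.contains x == stopc.contains c)).dropWhile
              (fun x => !(startc.contains x))).length =
            (c :: rest.takeWhile (fun x => stopc.contains x == stopc.contains c)).length := by
          rw [← List.length_append, List.takeWhile_append_dropWhile]
        split_ifs with hde
        · rfl
        · refine List.cons_eq_cons.mpr ⟨?_, rfl⟩
          refine Prod.ext ?_ rfl
          dsimp only
          push_cast
          omega
  exact fun codons => main codons.length codons le_rfl

-- coordinates produced by B's core are nonnegative and properly ordered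
theorem bOrf_bounds (startc stopc : List String) (codons : List String) :
    ∀ p ∈ bOrfCoords startc stopc codons, 0 ≤ p.1 ∧ p.1 < p.2 := by
  rw [bOrfCoords_eq_outSpec]
  intro p hp
  unfold outSpec at hp
  obtain ⟨q, hq, hfq⟩ := List.mem_filterMap.mp hp
  cases hb : fsSpec startc ((bRidLoop stopc codons none (-1)).1.zip codons) 0 q with
  | none => rw [hb] at hfq; simp at hfq
  | some b =>
    rw [hb] at hfq
    obtain ⟨h0, v, hv, hbv⟩ :=
      fsSpec_bounds startc ((bRidLoop stopc codons none (-1)).1.zip codons) 0 q b hb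
    rw [hv] at hfq
    simp only [Option.map_some, Option.getD_some, Option.some_inj] at hfq
    subst hfq
    constructor <;> simp <;> omega

theorem foldl_min_nonneg : ∀ (l : List Int) (a : Int), 0 ≤ a → (∀ x ∈ l, 0 ≤ x) →
    0 ≤ l.foldl min a := by
  intro l
  induction l with
  | nil => intro a ha _; simpa using ha
  | cons x l ih =>
    intro a ha h
    simp only [List.foldl_cons]
    exact ih (min a x) (le_min ha (h x List.mem_cons_self)) (fun y hy => h y (List.mem_cons_of_mem _ hy))

theorem min_flat_eq_min_fst (l : List (Int × Int)) (h : ∀ p ∈ l, p.1 < p.2) :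
    PySem.List.min? (l.flatMap (fun p => [p.1, p.2])) (fun x => x) =
      PySem.List.min? (l.map (fun p => p.1)) (fun x => x) := by
  have aux : ∀ (t : List (Int × Int)) (acc : Int), (∀ q ∈ t, q.1 < q.2) →
      List.foldl min acc (t.flatMap (fun q => [q.1, q.2])) =
        List.foldl min acc (t.map (fun q => q.1)) := by
    intro t
    induction t with
    | nil => intro acc _; rfl
    | cons q t ihq =>
      intro acc ht
      simp only [List.flatMap_cons, List.map_cons, List.cons_append, List.foldl_cons,
        List.nil_append]
      have hq : min (min acc q.1) q.2 = min acc q.1 :=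
        min_eq_left (le_trans (min_le_right _ _) (le_of_lt (ht q (List.mem_cons_self))))
      rw [hq]
      exact ihq _ (fun r hr => ht r (List.mem_cons_of_mem _ hr))
  cases l with
  | nil => rfl
  | cons p t =>
    simp only [List.flatMap_cons, List.map_cons, List.cons_append]
    rw [PySem.List.min?_id_cons, PySem.List.min?_id_cons]
    congr 1
    simp only [List.foldl_cons]
    rw [min_eq_left (le_of_lt (h p List.mem_cons_self))]
    exact aux t _ (fun r hr => h r (List.mem_cons_of_mem _ hr))

-- the accumulator loop of B computes A's recursion
theorem loop_eq (startc stopc : List String) (min_len : Int) :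
    ∀ (fuel : Nat) (seqc : List Char) (frame : Int) (acc : List (Int × Int)), 1 ≤ frame →
      bLoop startc stopc min_len fuel seqc frame acc =
        acc ++ aRec startc stopc min_len fuel seqc frame := by
  intro fuel
  induction fuel with
  | zero => intro seqc frame acc _; simp [bLoop, aRec]
  | succ fuel ih =>
    intro seqc frame acc hfr
    simp only [bLoop, aRec]
    rw [if_neg (by omega : ¬ frame < 1)]
    by_cases h2 : (seqc.length : Int) < min_len
    · rw [if_pos h2, if_pos h2]
      simp
    · rw [if_neg h2, if_neg h2]
      have hcoords : bOrfCoords startc stopc (bCodons (seqc.drop (frame - 1).toNat)) =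
          aOrfCoords startc stopc (seqc.drop (frame - 1).toNat) := by
        rw [codons_eq, bOrf_eq_acore, aOrfCoords_eq_acoreP]
      have hbounds0 := bOrf_bounds startc stopc (bCodons (seqc.drop (frame - 1).toNat))
      rw [hcoords] at hbounds0
      rw [hcoords]
      set coords := (aOrfCoords startc stopc (seqc.drop (frame - 1).toNat)).map
        (fun p => (p.1 + (((frame - 1).toNat : Nat) : Int), p.2 + (((frame - 1).toNat : Nat) : Int))) with hc
      set filtered := coords.filter (fun p => decide (min_len ≤ p.2 - p.1)) with hfil
      have hpl : ∀ p ∈ filtered, 0 ≤ p.1 ∧ p.1 < p.2 := by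
        intro p hp
        have hpc : p ∈ coords := List.mem_of_mem_filter hp
        rw [hc] at hpc
        rcases List.mem_map.mp hpc with ⟨q, hq, rfl⟩
        have := hbounds0 q hq
        constructor <;> simp <;> omega
      have hcont : ∀ (i : Int),
          PySem.Set.contains
            (PySem.Set.ofList (coords.map (fun p => PySem.Int.floordiv p.1 3))) i =
            (coords.map (fun p => PySem.Int.floordiv p.1 3)).contains i := by
        intro i
        simp [PySem.Set.contains_eq_listContains]
      have hnew : ((PySem.List.enumerate
              (aGetCodons (seqc.drop ((frame - 1).toNat % 3))) 0).map
            (fun q => if (coords.map (fun p => PySem.Int.floordiv p.1 3)).contains q.1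
              then "..." else q.2)).foldl
            (fun a s => a ++ s.toList) (seqc.take ((frame - 1).toNat % 3)) =
          (seqc.take ((frame - 1).toNat % 3) ::
            (PySem.List.enumerate (bCodons (seqc.drop ((frame - 1).toNat % 3))) 0).map
              (fun q => if PySem.Set.contains
                  (PySem.Set.ofList (coords.map (fun p => PySem.Int.floordiv p.1 3))) q.1
                then ['.', '.', '.'] else q.2.toList)).flatten := by
        rw [codons_eq, PySem.List.foldl_append_eq_flatMap, List.flatten_cons]
        congr 1
        rw [List.flatMap_def, List.map_map]
        congr 1
        refine List.map_congr_left (fun q _ => ?_)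
        simp only [Function.comp_apply, hcont]
        by_cases hq : (coords.map (fun p => PySem.Int.floordiv p.1 3)).contains q.1 = true
        · rw [if_pos hq, if_pos hq]; rfl
        · rw [if_neg hq, if_neg hq]
      cases hfe : filtered with
      | nil => simp
      | cons p0 rest0 =>
        rw [if_neg (by simp), if_neg (by simp)]
        have hmin : PySem.List.min? ((p0 :: rest0).flatMap (fun p => [p.1, p.2])) (fun x => x) =
            PySem.List.min? ((p0 :: rest0).map (fun p => p.1)) (fun x => x) :=
          min_flat_eq_min_fst (p0 :: rest0) (fun p hp => (hpl p (by rw [hfe]; exact hp)).2)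
      
        have hfr' : 1 ≤ (PySem.List.min? ((p0 :: rest0).map (fun p => p.1)) (fun x => x)).getD 0 + 4 := by
          simp only [List.map_cons]
          rw [PySem.List.min?_id_cons]
          simp only [Option.getD_some]
          have h0 : 0 ≤ (rest0.map (fun p => p.1)).foldl min p0.1 := by
            refine foldl_min_nonneg _ _ ?_ ?_
            · exact (hpl p0 (by rw [hfe]; exact List.mem_cons_self)).1
            · intro x hx
              rcases List.mem_map.mp hx with ⟨p, hp, rfl⟩
              exact (hpl p (by rw [hfe]; exact List.mem_cons_of_mem _ hp)).1
          omega
        rw [ih _ _ _ hfr']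
        rw [← hnew, hmin, List.append_assoc]
  
-- ===== VERDICT (by name: the statement is the Claim_ definition above) =====
theorem get_orf_coords_for_forward_frame_spec : Claim_equal_get_orf_coords_for_forward_frame := by
  intro seq startc stopc min_len frame _ hpre
  unfold Spec_get_orf_coords_for_forward_frame get_orf_coords_for_forward_frame
    get_orf_coords_for_forward_frame_alt
  have hpre' : 1 ≤ frame := hpre
  rw [if_neg (by omega : ¬ frame < 1)]
  rw [loop_eq startc stopc min_len _ _ _ [] hpre']
  simp
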